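-- pv_equiv track=rewrite | github.com/MoeFourtyTwo/advent-of-code | aoc/tasks/year_2023/day_19/part_2.py | find_predecessors
-- ===== SOURCE A (Python) =====
-- import functools
-- import operator
--
-- def outcome(step: str) -> str:
--     return step.split(":")[-1]
--
-- def find_predecessors(workflows: dict[str, list[str]], node: str) -> set[tuple[str, int]]:
--     predecessors = set()
--     for name, workflow in workflows.items():
--         for index, step in enumerate(workflow):
--             if outcome(step) == node:
--                 predecessors.add((name, index))
--
--     return predecessors | functools.reduce(
--         operator.or_, [find_predecessors(workflows, n) for n, _ in predecessors], set()
--     )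
-- ===== SOURCE B (Python) =====
-- def find_predecessors(workflows: dict[str, list[str]], node: str) -> set[tuple[str, int]]:
--     # Build the reverse-adjacency index once, then DFS with a visited set.
--     rev: dict[str, list[tuple[str, int]]] = {}
--     for name, workflow in workflows.items():
--         for index, step in enumerate(workflow):
--             rev.setdefault(step.split(":")[-1], []).append((name, index))
--
--     result: set[tuple[str, int]] = set()
--     visited: set[str] = set()
--
--     def visit(v: str) -> None:
--         if v in visited:
--             return
--         visited.add(v)
--         for pair in rev.get(v, []):
--             result.add(pair)
--         for n, _ in rev.get(v, []):
--             visit(n)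
--
--     visit(node)
--     return result
-- ===== Notes on version B (the rewrite author's own statement) =====
-- stated objective: alternative
-- what changed: A rescans every workflow step and re-recurses for each direct predecessor (revisiting nodes once per path); B builds a reverse-adjacency map once and runs a single DFS with a visited set, so each node is expanded at most once. (B also terminates, instead of A's RecursionError, on cyclic graphs — outside Pre_.)
import Mathlib
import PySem

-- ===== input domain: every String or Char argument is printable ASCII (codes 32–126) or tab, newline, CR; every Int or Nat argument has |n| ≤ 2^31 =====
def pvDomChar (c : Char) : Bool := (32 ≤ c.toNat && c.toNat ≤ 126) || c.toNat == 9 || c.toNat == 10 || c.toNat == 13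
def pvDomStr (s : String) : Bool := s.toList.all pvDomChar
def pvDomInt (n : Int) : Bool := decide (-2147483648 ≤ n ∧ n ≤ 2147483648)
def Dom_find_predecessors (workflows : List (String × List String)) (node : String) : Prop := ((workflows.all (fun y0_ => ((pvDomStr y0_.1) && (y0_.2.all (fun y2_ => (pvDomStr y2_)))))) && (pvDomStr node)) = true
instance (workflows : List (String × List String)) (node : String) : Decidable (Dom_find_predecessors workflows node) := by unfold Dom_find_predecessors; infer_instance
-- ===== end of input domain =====

-- B replaces A's rescanning recursion by a reverse-adjacency map built once plus a
-- visited-set DFS that expands each node at most once (objective: alternative algorithm).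
-- Equivalence is about the returned set (the ports produce the same insertion-ordered list;
-- Python set iteration order is not modelled).

-- outcome(step) = step.split(":")[-1]  (shared helper of both Python files)
def outcome (step : String) : String :=
  PySem.List.pyGetD ((PySem.Str.split? step ":").getD []) (-1) ""

-- ===== PORT A =====
-- A's recursion is unbounded; under Pre_ (no cycle reachable from node) its depth is at most
-- workflows.length + 1, so that fuel is never exhausted; fuel 0 marks Python's RecursionError.
def findPredA : Nat → List (String × List String) → String → PySem.Set (String × Int)
  | 0, _, _ => []
  | fuel+1, workflows, node =>
    let predecessors : PySem.Set (String × Int) :=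
      (PySem.Dict.ofList workflows).items.foldl (fun acc nw =>
        (PySem.List.enumerate nw.2).foldl (fun acc is =>
          if outcome is.2 == node then PySem.Set.add acc (nw.1, is.1) else acc) acc)
        PySem.Set.empty
    PySem.Set.union predecessors
      (predecessors.foldl (fun acc p => PySem.Set.union acc (findPredA fuel workflows p.1))
        PySem.Set.empty)

def find_predecessors (workflows : List (String × List String)) (node : String) : List (String × Int) :=
  findPredA (workflows.length + 1) workflows node

-- ===== PORT B =====
-- rev: for each outcome string, the list of (name, index) steps producing it (insertion order)
def revMap (workflows : List (String × List String)) : PySem.Dict String (List (String × Int)) :=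
  (PySem.Dict.ofList workflows).items.foldl (fun rev nw =>
    (PySem.List.enumerate nw.2).foldl (fun rev is =>
      rev.modify (outcome is.2) [] (fun l => l ++ [(nw.1, is.1)])) rev)
    PySem.Dict.empty

-- visit(v): DFS threading (visited, result); depth ≤ distinct names + 2, so the fuel
-- workflows.length + 2 is never exhausted (the visited set blocks revisits, also on cycles).
def visitB (rev : PySem.Dict String (List (String × Int))) :
    Nat → String → PySem.Set String × PySem.Set (String × Int) →
    PySem.Set String × PySem.Set (String × Int)
  | 0, _, st => st
  | fuel+1, v, (visited, result) =>
    if PySem.Set.contains visited v then (visited, result)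
    else
      let visited := PySem.Set.add visited v
      let ps := rev.getD v []
      let result := PySem.Set.update result ps
      ps.foldl (fun st p => visitB rev fuel p.1 st) (visited, result)

def find_predecessors_alt (workflows : List (String × List String)) (node : String) : List (String × Int) :=
  (visitB (revMap workflows) (workflows.length + 2) node (PySem.Set.empty, PySem.Set.empty)).2

-- ===== PRECONDITION & SPEC =====
-- The workflow steps, flattened to (outcome, (name, index)) in scan order.
def pvPairs (workflows : List (String × List String)) : List (String × (String × Int)) :=
  (PySem.Dict.ofList workflows).items.flatMap (fun nw =>
    (PySem.List.enumerate nw.2).map (fun is => (outcome is.2, (nw.1, is.1))))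

-- Direct predecessor steps of v, in scan order (the value A's inner scan collects for v).
def pvDirect (workflows : List (String × List String)) (v : String) : List (String × Int) :=
  ((pvPairs workflows).filter (fun q => q.1 == v)).map (fun q => q.2)

-- Names of the workflows holding a direct predecessor step of v (edges of the graph A recurses on).
def pvDirectNames (workflows : List (String × List String)) (v : String) : List String :=
  (pvDirect workflows v).map (fun p => p.1)

-- One closure step: add to S every name with a step leading into a member of S.
def pvReachIter (workflows : List (String × List String)) : Nat → PySem.Set String → PySem.Set String
  | 0, S => S
  | k+1, S => pvReachIter workflows k
      (PySem.Set.update S (S.flatMap (pvDirectNames workflows)))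

-- All transitive predecessors of v (closure reached: at most workflows.length names can be added).
def pvReach (workflows : List (String × List String)) (v : String) : PySem.Set String :=
  pvReachIter workflows (workflows.length + 1) (PySem.Set.ofList (pvDirectNames workflows v))

-- Pre_ excludes exactly the inputs on which Python A raises RecursionError: those where some
-- node of the predecessor graph reachable from `node` lies on a cycle (is its own transitive
-- predecessor); A returns normally on every other input.
def Pre_find_predecessors (workflows : List (String × List String)) (node : String) : Prop :=
  ∀ m ∈ node :: pvReach workflows node, m ∉ pvReach workflows m

instance (workflows : List (String × List String)) (node : String) :
    Decidable (Pre_find_predecessors workflows node) := by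
  unfold Pre_find_predecessors; infer_instance

def pvWitness_find_predecessors : (List (String × List String)) × String :=
  ([("a", ["x<2:b", "c"]), ("b", ["q:c"])], "b")

def Spec_find_predecessors (workflows : List (String × List String)) (node : String)
    (out : List (String × Int)) : Prop := out = find_predecessors_alt workflows node

instance (workflows : List (String × List String)) (node : String) (out : List (String × Int)) :
    Decidable (Spec_find_predecessors workflows node out) := by
  unfold Spec_find_predecessors; infer_instance

-- ===== CLAIM (what is proved, stated in full; the proofs are below) =====
def Claim_equal_find_predecessors : Prop := ∀ (workflows : List (String × List String)) (node : String), Dom_find_predecessors workflows node → Pre_find_predecessors workflows node → Spec_find_predecessors workflows node (find_predecessors workflows node)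


-- ===== LEMMAS AND PROOFS =====

-- Set facts ---------------------------------------------------------------

theorem pv_foldl_add_eq_append {α : Type} [BEq α] [LawfulBEq α] (l : List α) :
    ∀ s : PySem.Set α, (∀ x ∈ l, x ∉ s) → l.Nodup → List.foldl PySem.Set.add s l = s ++ l := by
  induction l with
  | nil => intro s _ _; simp
  | cons x l ih =>
    intro s hdisj hnd
    have hx : x ∉ s := hdisj x (by simp)
    have hadd : PySem.Set.add s x = s ++ [x] := by
      simp [PySem.Set.add, hx]
    rw [List.foldl_cons, hadd, ih (s ++ [x])]
    · simp
    · intro y hy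
      simp only [List.mem_append, List.mem_singleton]
      rintro (h | rfl)
      · exact hdisj y (by simp [hy]) h
      · exact (List.nodup_cons.1 hnd).1 hy
    · exact (List.nodup_cons.1 hnd).2

theorem pv_ofList_eq_self {α : Type} [BEq α] [LawfulBEq α] (l : List α) (h : l.Nodup) :
    PySem.Set.ofList l = l := by
  rw [PySem.Set.ofList_eq_foldl, pv_foldl_add_eq_append l [] (by simp) h]
  simp

theorem pv_update_append {α : Type} [BEq α] (a : PySem.Set α) (l1 l2 : List α) :
    PySem.Set.update a (l1 ++ l2) = PySem.Set.update (PySem.Set.update a l1) l2 := by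
  simp [PySem.Set.update, List.foldl_append]

theorem pv_mem_update_left {α : Type} [BEq α] [LawfulBEq α] (a : PySem.Set α) (l : List α)
    {x : α} (h : x ∈ a) : x ∈ PySem.Set.update a l :=
  (PySem.Set.mem_update a l x).2 (Or.inl h)

theorem pv_mem_update_right {α : Type} [BEq α] [LawfulBEq α] (a : PySem.Set α) (l : List α)
    {x : α} (h : x ∈ l) : x ∈ PySem.Set.update a l :=
  (PySem.Set.mem_update a l x).2 (Or.inr h)

theorem pv_add_of_mem {α : Type} [BEq α] [LawfulBEq α] (s : PySem.Set α) {x : α} (h : x ∈ s) :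
    PySem.Set.add s x = s := by
  simp [PySem.Set.add, h]

theorem pv_add_of_not_mem {α : Type} [BEq α] [LawfulBEq α] (s : PySem.Set α) {x : α} (h : x ∉ s) :
    PySem.Set.add s x = s ++ [x] := by
  simp [PySem.Set.add, h]

theorem pv_update_eq_self {α : Type} [BEq α] [LawfulBEq α] (l : List α) :
    ∀ s : PySem.Set α, (∀ x ∈ l, x ∈ s) → PySem.Set.update s l = s := by
  induction l with
  | nil => intro s _; rfl
  | cons x l ih =>
    intro s h
    have : PySem.Set.update s (x :: l) = PySem.Set.update (PySem.Set.add s x) l := rfl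
    rw [this, pv_add_of_mem s (h x (by simp))]
    exact ih s (fun y hy => h y (by simp [hy]))

theorem pv_update_foldl_add {α : Type} [BEq α] [LawfulBEq α] (l : List α) :
    ∀ (a s : PySem.Set α),
      PySem.Set.update a (List.foldl PySem.Set.add s l) = PySem.Set.update (PySem.Set.update a s) l := by
  induction l with
  | nil => intro a s; rfl
  | cons x l ih =>
    intro a s
    rw [List.foldl_cons, ih]
    show PySem.Set.update (PySem.Set.update a (PySem.Set.add s x)) l
        = PySem.Set.update (PySem.Set.add (PySem.Set.update a s) x) l
    congr 1
    by_cases hx : x ∈ s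
    · rw [pv_add_of_mem s hx, pv_add_of_mem _ (pv_mem_update_right a s hx)]
    · rw [pv_add_of_not_mem s hx, pv_update_append]
      rfl

theorem pv_update_ofList {α : Type} [BEq α] [LawfulBEq α] (a : PySem.Set α) (l : List α) :
    PySem.Set.update a (PySem.Set.ofList l) = PySem.Set.update a l := by
  rw [PySem.Set.ofList_eq_foldl, pv_update_foldl_add]
  rfl

-- A's scan and B's reverse map, via the flattened pair list ----------------

theorem pv_foldl_if_filter {α β γ : Type} (p : α → Bool) (f : α → β) (g : γ → β → γ) (l : List α) :
    ∀ a : γ, List.foldl (fun a x => if p x then g a (f x) else a) a l =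
      List.foldl g a ((l.filter p).map f) := by
  induction l with
  | nil => intro a; rfl
  | cons x l ih =>
    intro a
    by_cases h : p x
    · simp [h, ih]
    · simp [h, ih]

theorem pv_scanA (workflows : List (String × List String)) (node : String) :
    ((PySem.Dict.ofList workflows).items.foldl (fun acc nw =>
        (PySem.List.enumerate nw.2).foldl (fun acc is =>
          if outcome is.2 == node then PySem.Set.add acc (nw.1, is.1) else acc) acc)
      PySem.Set.empty) = PySem.Set.ofList (pvDirect workflows node) := by
  have h1 : ∀ a : PySem.Set (String × Int),
      ((PySem.Dict.ofList workflows).items.foldl (fun acc nw =>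
        (PySem.List.enumerate nw.2).foldl (fun acc is =>
          if outcome is.2 == node then PySem.Set.add acc (nw.1, is.1) else acc) acc) a)
      = List.foldl (fun acc q => if q.1 == node then PySem.Set.add acc q.2 else acc) a
          (pvPairs workflows) := by
    intro a
    rw [pvPairs, List.foldl_flatMap]
    apply PySem.List.foldl_congr_mem
    intro acc nw _
    rw [List.foldl_map]
  rw [h1, pvDirect, PySem.Set.ofList_eq_foldl]
  exact pv_foldl_if_filter (fun q => q.1 == node) (fun q => q.2) PySem.Set.add
    (pvPairs workflows) PySem.Set.empty

theorem pv_pairs_snd_nodup (workflows : List (String × List String)) :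
    ((pvPairs workflows).map (fun q => q.2)).Nodup := by
  rw [pvPairs, List.map_flatMap]
  rw [List.nodup_flatMap]
  constructor
  · intro nw _
    rw [List.map_map]
    have h := PySem.List.pairwise_lt_enumerate nw.2 0
    have h2 : List.Pairwise (fun p q : Int × String => p.1 ≠ q.1) (PySem.List.enumerate nw.2) :=
      h.imp (fun hab => ne_of_lt hab)
    have h3 : List.Pairwise (fun x y : String × Int => x ≠ y)
        ((PySem.List.enumerate nw.2).map (fun is => (nw.1, is.1))) := by
      rw [List.pairwise_map]
      refine h2.imp ?_
      intro a b hab hcontra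
      exact hab (by simpa using congrArg Prod.snd hcontra)
    simpa [Function.comp] using h3
  · have hkeys : ((PySem.Dict.ofList workflows).items.map (fun p => p.1)).Nodup :=
      PySem.Dict.nodup_keys_ofList workflows
    have hp : List.Pairwise (fun nw nw' : String × List String => nw.1 ≠ nw'.1)
        (PySem.Dict.ofList workflows).items := by
      rw [List.Nodup, List.pairwise_map] at hkeys
      exact hkeys
    refine hp.imp ?_
    intro nw nw' hne x hx hx'
    simp only [List.map_map, List.mem_map, Function.comp] at hx hx'
    obtain ⟨a, _, rfl⟩ := hx
    obtain ⟨b, _, hb⟩ := hx'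
    exact hne (by simpa using congrArg Prod.fst hb.symm)

theorem pv_direct_nodup (workflows : List (String × List String)) (v : String) :
    (pvDirect workflows v).Nodup := by
  have h := pv_pairs_snd_nodup workflows
  rw [pvDirect]
  exact h.sublist (List.Sublist.map _ List.filter_sublist)

theorem pv_revMap_getD (workflows : List (String × List String)) (v : String) :
    (revMap workflows).getD v [] = pvDirect workflows v := by
  have h1 : revMap workflows =
      List.foldl (fun d q => d.modify q.1 [] (fun l => l ++ [q.2])) PySem.Dict.empty
        (pvPairs workflows) := by
    rw [revMap, pvPairs, List.foldl_flatMap]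
    apply PySem.List.foldl_congr_mem
    intro acc nw _
    rw [List.foldl_map]
  rw [h1, PySem.Dict.getD_foldl_modify_append, PySem.Dict.getD_empty]
  rfl

-- The (duplicated) emission sequence of A's recursion, at a given recursion depth ---------

def pvEmit (workflows : List (String × List String)) : Nat → String → List (String × Int)
  | 0, _ => []
  | f+1, v => pvDirect workflows v ++
      (pvDirect workflows v).flatMap (fun p => pvEmit workflows f p.1)

theorem pv_foldl_update {α β : Type} [BEq α] (g : β → List α) (l : List β) :
    ∀ a : PySem.Set α,
      List.foldl (fun acc p => PySem.Set.update acc (g p)) a l = PySem.Set.update a (l.flatMap g) := by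
  induction l with
  | nil => intro a; rfl
  | cons x l ih =>
    intro a
    rw [List.foldl_cons, ih, List.flatMap_cons, pv_update_append]

theorem pv_findPredA_eq_emit (workflows : List (String × List String)) :
    ∀ (f : Nat) (v : String),
      findPredA f workflows v = PySem.Set.ofList (pvEmit workflows f v) := by
  intro f
  induction f with
  | zero => intro v; rfl
  | succ f ih =>
    intro v
    rw [findPredA]
    have hscan := pv_scanA workflows v
    rw [pv_ofList_eq_self _ (pv_direct_nodup workflows v)] at hscan
    simp only [hscan]
    have hcongr : List.foldl (fun acc p => PySem.Set.union acc (findPredA f workflows p.1))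
          (PySem.Set.empty : PySem.Set (String × Int)) (pvDirect workflows v)
        = List.foldl (fun acc p => PySem.Set.update acc (pvEmit workflows f p.1))
          PySem.Set.empty (pvDirect workflows v) := by
      apply PySem.List.foldl_congr_mem
      intro acc p _
      show PySem.Set.update acc (findPredA f workflows p.1) = _
      rw [ih p.1, pv_update_ofList]
    rw [hcongr, pv_foldl_update]
    show PySem.Set.update (pvDirect workflows v)
        (PySem.Set.update PySem.Set.empty ((pvDirect workflows v).flatMap fun p => pvEmit workflows f p.1)) = _
    rw [show (PySem.Set.update PySem.Set.empty ((pvDirect workflows v).flatMap fun p => pvEmit workflows f p.1))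
        = PySem.Set.ofList ((pvDirect workflows v).flatMap fun p => pvEmit workflows f p.1) from rfl,
      pv_update_ofList, pvEmit, PySem.Set.ofList_eq_foldl, List.foldl_append,
      ← PySem.Set.ofList_eq_foldl, pv_ofList_eq_self _ (pv_direct_nodup workflows v)]
    rfl

-- Reachability: pvReach computes a superset of the direct-predecessor names that is closed
-- under taking direct predecessors (the closure stabilises within workflows.length steps).

def pvKeys (workflows : List (String × List String)) : List String :=
  (PySem.Dict.ofList workflows).keys

def pvClosed (workflows : List (String × List String)) (T : List String) : Prop :=
  ∀ v ∈ T, ∀ c ∈ pvDirectNames workflows v, c ∈ T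

theorem pv_mem_reachIter_of_mem (workflows : List (String × List String)) :
    ∀ (k : Nat) (S : PySem.Set String) (x : String), x ∈ S → x ∈ pvReachIter workflows k S := by
  intro k
  induction k with
  | zero => intro S x hx; exact hx
  | succ k ih =>
    intro S x hx
    exact ih _ x (pv_mem_update_left _ _ hx)

theorem pv_directNames_subset_keys (workflows : List (String × List String)) (v : String)
    {c : String} (hc : c ∈ pvDirectNames workflows v) : c ∈ pvKeys workflows := by
  rw [pvDirectNames, pvDirect, pvPairs] at hc
  simp only [List.mem_map, List.mem_filter, List.mem_flatMap] at hc
  obtain ⟨p, ⟨q, ⟨⟨nw, hnw, is, his, rfl⟩, _⟩, rfl⟩, rfl⟩ := hc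
  show nw.1 ∈ pvKeys workflows
  exact List.mem_map.2 ⟨nw, hnw, rfl⟩

theorem pv_reachIter_subset_closed (workflows : List (String × List String))
    (T : List String) (hT : pvClosed workflows T) :
    ∀ (k : Nat) (S : PySem.Set String), (∀ x ∈ S, x ∈ T) →
      ∀ x ∈ pvReachIter workflows k S, x ∈ T := by
  intro k
  induction k with
  | zero => intro S hS x hx; exact hS x hx
  | succ k ih =>
    intro S hS
    apply ih
    intro x hx
    rcases (PySem.Set.mem_update _ _ x).1 hx with h | h
    · exact hS x h
    · obtain ⟨v, hv, hc⟩ := List.mem_flatMap.1 h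
      exact hT v (hS v hv) x hc

theorem pv_reachIter_of_closed (workflows : List (String × List String)) :
    ∀ (k : Nat) (S : PySem.Set String), pvClosed workflows S → pvReachIter workflows k S = S := by
  intro k
  induction k with
  | zero => intro S _; rfl
  | succ k ih =>
    intro S hS
    have : PySem.Set.update S (S.flatMap (pvDirectNames workflows)) = S := by
      apply pv_update_eq_self
      intro x hx
      obtain ⟨v, hv, hc⟩ := List.mem_flatMap.1 hx
      exact hS v hv x hc
    rw [pvReachIter, this]
    exact ih S hS

theorem pv_items_ofList_len {κ ν : Type} [BEq κ] (l : List (κ × ν)) :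
    ∀ d : PySem.Dict κ ν,
      (l.foldl (fun d p => d.insert p.1 p.2) d).items.length ≤ d.items.length + l.length := by
  induction l with
  | nil => intro d; simp
  | cons p l ih =>
    intro d
    rw [List.foldl_cons]
    refine le_trans (ih _) ?_
    have : (d.insert p.1 p.2).items.length ≤ d.items.length + 1 := by
      rw [PySem.Dict.items_insert]
      split_ifs <;> simp
    simp only [List.length_cons]
    omega

theorem pv_keys_len (workflows : List (String × List String)) :
    (pvKeys workflows).length ≤ workflows.length := by
  have h : (PySem.Dict.ofList workflows).items.length ≤
      (PySem.Dict.empty : PySem.Dict String (List String)).items.length + workflows.length :=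
    pv_items_ofList_len workflows PySem.Dict.empty
  have hz : (PySem.Dict.empty : PySem.Dict String (List String)).items.length = 0 := rfl
  have hk : (pvKeys workflows).length = (PySem.Dict.ofList workflows).items.length := by
    show ((PySem.Dict.ofList workflows).items.map (fun p => p.1)).length = _
    rw [List.length_map]
  omega

theorem pv_reachIter_closed (workflows : List (String × List String)) :
    ∀ (k : Nat) (S : PySem.Set String),
      ((pvKeys workflows).toFinset \ S.toFinset).card < k →
      pvClosed workflows (pvReachIter workflows k S) := by
  intro k
  induction k with
  | zero => intro S h; omega
  | succ k ih =>
    intro S hcard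
    by_cases hS : pvClosed workflows S
    · rw [pv_reachIter_of_closed workflows _ S hS]
      exact hS
    · rw [pvReachIter]
      apply ih
      rw [pvClosed] at hS
      push Not at hS
      obtain ⟨v, hv, c, hc, hcS⟩ := hS
      have hcF : c ∈ PySem.Set.update S (S.flatMap (pvDirectNames workflows)) :=
        pv_mem_update_right _ _ (List.mem_flatMap.2 ⟨v, hv, hc⟩)
      have hsub : S.toFinset ⊆ (PySem.Set.update S (S.flatMap (pvDirectNames workflows))).toFinset := by
        intro x hx
        rw [List.mem_toFinset] at hx ⊢
        exact pv_mem_update_left _ _ hx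
      have hk : c ∈ (pvKeys workflows).toFinset := List.mem_toFinset.2 (pv_directNames_subset_keys workflows v hc)
      have hstrict : ((pvKeys workflows).toFinset \ (PySem.Set.update S (S.flatMap (pvDirectNames workflows))).toFinset).card
          < ((pvKeys workflows).toFinset \ S.toFinset).card := by
        apply Finset.card_lt_card
        constructor
        · exact Finset.sdiff_subset_sdiff (Finset.Subset.refl _) hsub
        · intro hcontra
          have h1 : c ∈ (pvKeys workflows).toFinset \ S.toFinset :=
            Finset.mem_sdiff.2 ⟨hk, fun h => hcS (List.mem_toFinset.1 h)⟩
          have h2 := hcontra h1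
          simp only [Finset.mem_sdiff, List.mem_toFinset] at h2
          exact h2.2 hcF
      omega

theorem pv_reach_closed (workflows : List (String × List String)) (v : String) :
    pvClosed workflows (pvReach workflows v) := by
  rw [pvReach]
  apply pv_reachIter_closed
  have h1 := Finset.card_le_card (Finset.sdiff_subset
    (s := (pvKeys workflows).toFinset) (t := (PySem.Set.ofList (pvDirectNames workflows v)).toFinset))
  have h2 := List.toFinset_card_le (pvKeys workflows)
  have h3 := pv_keys_len workflows
  omega

theorem pv_direct_subset_reach (workflows : List (String × List String)) (v : String)
    {c : String} (hc : c ∈ pvDirectNames workflows v) : c ∈ pvReach workflows v := by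
  rw [pvReach]
  exact pv_mem_reachIter_of_mem workflows _ _ c ((PySem.Set.mem_ofList _ c).2 hc)

theorem pv_reach_trans (workflows : List (String × List String)) {n v c : String}
    (hv : v ∈ pvReach workflows n) (hc : c ∈ pvDirectNames workflows v) :
    c ∈ pvReach workflows n :=
  pv_reach_closed workflows n v hv c hc

theorem pv_reach_mono (workflows : List (String × List String)) {n c : String}
    (hc : c ∈ pvReach workflows n) :
    ∀ x ∈ pvReach workflows c, x ∈ pvReach workflows n := by
  intro x hx
  rw [pvReach] at hx
  refine pv_reachIter_subset_closed workflows _ (pv_reach_closed workflows n) _ _ ?_ x hx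
  intro y hy
  exact pv_reach_trans workflows hc ((PySem.Set.mem_ofList _ y).1 hy)

theorem pv_reach_subset_keys (workflows : List (String × List String)) (v : String) :
    ∀ x ∈ pvReach workflows v, x ∈ pvKeys workflows := by
  intro x hx
  rw [pvReach] at hx
  refine pv_reachIter_subset_closed workflows (pvKeys workflows) ?_ _ _ ?_ x hx
  · intro u _ c hc
    exact pv_directNames_subset_keys workflows u hc
  · intro y hy
    exact pv_directNames_subset_keys workflows v ((PySem.Set.mem_ofList _ y).1 hy)

-- The depth measure and the fuel-independent emission sequence -------------------------

def pvM (workflows : List (String × List String)) (v : String) : Nat :=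
  (pvReach workflows v).toFinset.card

def pvE (workflows : List (String × List String)) (v : String) : List (String × Int) :=
  pvEmit workflows (pvM workflows v + 1) v

theorem pv_step_in_N (workflows : List (String × List String)) (node : String)
    {v c : String} (hv : v ∈ node :: pvReach workflows node)
    (hc : c ∈ pvDirectNames workflows v) : c ∈ node :: pvReach workflows node := by
  rcases List.mem_cons.1 hv with rfl | hv
  · exact List.mem_cons_of_mem _ (pv_direct_subset_reach workflows v hc)
  · exact List.mem_cons_of_mem _ (pv_reach_trans workflows hv hc)

theorem pv_m_lt (workflows : List (String × List String)) (node : String)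
    (hPre : Pre_find_predecessors workflows node)
    {v c : String} (hv : v ∈ node :: pvReach workflows node)
    (hc : c ∈ pvDirectNames workflows v) : pvM workflows c < pvM workflows v := by
  have hcv : c ∈ pvReach workflows v := pv_direct_subset_reach workflows v hc
  have hcN : c ∈ node :: pvReach workflows node := pv_step_in_N workflows node hv hc
  have hcc : c ∉ pvReach workflows c := hPre c hcN
  apply Finset.card_lt_card
  constructor
  · intro x hx
    rw [List.mem_toFinset] at hx ⊢
    exact pv_reach_mono workflows hcv x hx
  · intro hcontra
    have := hcontra (List.mem_toFinset.2 hcv)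
    exact hcc (List.mem_toFinset.1 this)

theorem pv_emit_stable (workflows : List (String × List String)) (node : String)
    (hPre : Pre_find_predecessors workflows node) :
    ∀ (K : Nat) (v : String), v ∈ node :: pvReach workflows node → pvM workflows v < K →
      pvEmit workflows K v = pvE workflows v := by
  intro K
  induction K using Nat.strong_induction_on with
  | _ K ih =>
    intro v hv hK
    match K, hK with
    | K'+1, hK =>
      rw [pvEmit, pvE, pvEmit]
      congr 1
      apply List.flatMap_congr
      intro p hp
      have hpn : p.1 ∈ pvDirectNames workflows v := List.mem_map.2 ⟨p, hp, rfl⟩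
      have hN := pv_step_in_N workflows node hv hpn
      have hlt := pv_m_lt workflows node hPre hv hpn
      rw [ih K' (by omega) p.1 hN (by omega),
        ih (pvM workflows v) (by omega) p.1 hN (by omega)]

theorem pv_E_unfold (workflows : List (String × List String)) (node : String)
    (hPre : Pre_find_predecessors workflows node)
    {v : String} (hv : v ∈ node :: pvReach workflows node) :
    pvE workflows v = pvDirect workflows v ++
      (pvDirect workflows v).flatMap (fun p => pvE workflows p.1) := by
  rw [pvE, pvEmit]
  congr 1
  apply List.flatMap_congr
  intro p hp
  have hpn : p.1 ∈ pvDirectNames workflows v := List.mem_map.2 ⟨p, hp, rfl⟩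
  exact pv_emit_stable workflows node hPre (pvM workflows v) p.1
    (pv_step_in_N workflows node hv hpn) (pv_m_lt workflows node hPre hv hpn)

theorem pv_m_le (workflows : List (String × List String)) (v : String) :
    pvM workflows v ≤ workflows.length := by
  have h1 : (pvReach workflows v).toFinset ⊆ (pvKeys workflows).toFinset := by
    intro x hx
    rw [List.mem_toFinset] at hx ⊢
    exact pv_reach_subset_keys workflows v x hx
  have h2 := Finset.card_le_card h1
  have h3 := List.toFinset_card_le (pvKeys workflows)
  have h4 := pv_keys_len workflows
  rw [pvM]
  omega

theorem pv_A_final (workflows : List (String × List String)) (node : String)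
    (hPre : Pre_find_predecessors workflows node) :
    find_predecessors workflows node = PySem.Set.ofList (pvE workflows node) := by
  rw [find_predecessors, pv_findPredA_eq_emit,
    pv_emit_stable workflows node hPre (workflows.length + 1) node List.mem_cons_self
      (by have := pv_m_le workflows node; omega)]

-- B's DFS: the visited set only prunes re-traversals whose emissions are already present,
-- so the accumulated result set is exactly A's deduplicated emission sequence. ------------

theorem pv_card_sdiff_le {X : Finset String} {a b : PySem.Set String}
    (h : ∀ x ∈ a, x ∈ b) : (X \ b.toFinset).card ≤ (X \ a.toFinset).card := by
  apply Finset.card_le_card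
  apply Finset.sdiff_subset_sdiff (Finset.Subset.refl _)
  intro x hx
  rw [List.mem_toFinset] at hx ⊢
  exact h x hx

theorem pv_mem_node_keys (workflows : List (String × List String)) (node : String)
    {v : String} (hv : v ∈ node :: pvReach workflows node) : v ∈ node :: pvKeys workflows := by
  rcases List.mem_cons.1 hv with rfl | hv
  · exact List.mem_cons_self
  · exact List.mem_cons_of_mem _ (pv_reach_subset_keys workflows node v hv)

theorem pv_B_fold (workflows : List (String × List String)) (node : String)
    (fuel : Nat)
    (IH : ∀ (v' : String) (vis : PySem.Set String) (out : PySem.Set (String × Int)),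
      v' ∈ node :: pvReach workflows node →
      ((node :: pvKeys workflows).toFinset \ vis.toFinset).card < fuel →
      (∀ n ∈ vis, (∀ q ∈ pvE workflows n, q ∈ out) ∨ v' ∈ pvReach workflows n) →
      (visitB (revMap workflows) fuel v' (vis, out)).2 = PySem.Set.update out (pvE workflows v') ∧
      (∀ x ∈ vis, x ∈ (visitB (revMap workflows) fuel v' (vis, out)).1) ∧
      (∀ n ∈ (visitB (revMap workflows) fuel v' (vis, out)).1,
        (∀ q ∈ pvE workflows n, q ∈ (visitB (revMap workflows) fuel v' (vis, out)).2) ∨ n ∈ vis))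
    (v : String) (hvN : v ∈ node :: pvReach workflows node)
    (vis : PySem.Set String) (out : PySem.Set (String × Int))
    (hinv : ∀ n ∈ vis, (∀ q ∈ pvE workflows n, q ∈ out) ∨ v ∈ pvReach workflows n) :
    ∀ (l : List (String × Int)), (∀ p ∈ l, p.1 ∈ pvDirectNames workflows v) →
    ∀ (vis₁ : PySem.Set String) (out₁ : PySem.Set (String × Int)),
      (∀ x ∈ vis, x ∈ vis₁) →
      ((node :: pvKeys workflows).toFinset \ vis₁.toFinset).card < fuel →
      (∀ q ∈ out, q ∈ out₁) →
      (∀ n ∈ vis₁, (∀ q ∈ pvE workflows n, q ∈ out₁) ∨ n ∈ vis ∨ n = v) →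
      (l.foldl (fun st p => visitB (revMap workflows) fuel p.1 st) (vis₁, out₁)).2
          = PySem.Set.update out₁ (l.flatMap (fun p => pvE workflows p.1)) ∧
      (∀ x ∈ vis₁, x ∈ (l.foldl (fun st p => visitB (revMap workflows) fuel p.1 st) (vis₁, out₁)).1) ∧
      (∀ q ∈ out₁, q ∈ (l.foldl (fun st p => visitB (revMap workflows) fuel p.1 st) (vis₁, out₁)).2) ∧
      (∀ n ∈ (l.foldl (fun st p => visitB (revMap workflows) fuel p.1 st) (vis₁, out₁)).1,
        (∀ q ∈ pvE workflows n, q ∈ (l.foldl (fun st p => visitB (revMap workflows) fuel p.1 st) (vis₁, out₁)).2)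
          ∨ n ∈ vis ∨ n = v) := by
  intro l
  induction l with
  | nil =>
    intro _ vis₁ out₁ hsub hcard hout hinv1
    refine ⟨rfl, fun x hx => hx, fun q hq => hq, ?_⟩
    intro n hn
    exact hinv1 n hn
  | cons p l ihl =>
    intro hl vis₁ out₁ hsub hcard hout hinv1
    have hc : p.1 ∈ pvDirectNames workflows v := hl p List.mem_cons_self
    have hcN : p.1 ∈ node :: pvReach workflows node := pv_step_in_N workflows node hvN hc
    have hinvc : ∀ n ∈ vis₁, (∀ q ∈ pvE workflows n, q ∈ out₁) ∨ p.1 ∈ pvReach workflows n := by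
      intro n hn
      rcases hinv1 n hn with h | h | rfl
      · exact Or.inl h
      · rcases hinv n h with h' | h'
        · exact Or.inl (fun q hq => hout q (h' q hq))
        · exact Or.inr (pv_reach_trans workflows h' hc)
      · exact Or.inr (pv_direct_subset_reach workflows n hc)
    obtain ⟨h1, h2, h3⟩ := IH p.1 vis₁ out₁ hcN hcard hinvc
    have hfold : (List.foldl (fun st p => visitB (revMap workflows) fuel p.1 st) (vis₁, out₁) (p :: l))
        = List.foldl (fun st p => visitB (revMap workflows) fuel p.1 st)
            (visitB (revMap workflows) fuel p.1 (vis₁, out₁)) l := rfl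
    set st1 := visitB (revMap workflows) fuel p.1 (vis₁, out₁) with hst1
    have hpair : st1 = (st1.1, st1.2) := rfl
    have hrec := ihl (fun q hq => hl q (List.mem_cons_of_mem _ hq)) st1.1 st1.2
      (fun x hx => h2 x (hsub x hx))
      (lt_of_le_of_lt (pv_card_sdiff_le h2) hcard)
      (fun q hq => by rw [h1]; exact pv_mem_update_left _ _ (hout q hq))
      (by
        intro n hn
        rcases h3 n hn with h | h
        · exact Or.inl h
        · rcases hinv1 n h with h' | h'
          · exact Or.inl (fun q hq => by rw [h1]; exact pv_mem_update_left _ _ (h' q hq))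
          · exact Or.inr h')
    rw [hfold, hpair]
    refine ⟨?_, ?_, ?_, ?_⟩
    · rw [hrec.1, h1, ← pv_update_append, List.flatMap_cons]
    · intro x hx
      exact hrec.2.1 x (h2 x hx)
    · intro q hq
      refine hrec.2.2.1 q ?_
      rw [h1]
      exact pv_mem_update_left _ _ hq
    · exact hrec.2.2.2

theorem pv_B_main (workflows : List (String × List String)) (node : String)
    (hPre : Pre_find_predecessors workflows node) :
    ∀ (fuel : Nat) (v : String) (vis : PySem.Set String) (out : PySem.Set (String × Int)),
      v ∈ node :: pvReach workflows node →
      ((node :: pvKeys workflows).toFinset \ vis.toFinset).card < fuel →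
      (∀ n ∈ vis, (∀ q ∈ pvE workflows n, q ∈ out) ∨ v ∈ pvReach workflows n) →
      (visitB (revMap workflows) fuel v (vis, out)).2 = PySem.Set.update out (pvE workflows v) ∧
      (∀ x ∈ vis, x ∈ (visitB (revMap workflows) fuel v (vis, out)).1) ∧
      (∀ n ∈ (visitB (revMap workflows) fuel v (vis, out)).1,
        (∀ q ∈ pvE workflows n, q ∈ (visitB (revMap workflows) fuel v (vis, out)).2) ∨ n ∈ vis) := by
  intro fuel
  induction fuel with
  | zero => intro v vis out _ hcard _; omega
  | succ fuel ih =>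
    intro v vis out hvN hcard hinv
    by_cases hvis : PySem.Set.contains vis v
    · have hvmem : v ∈ vis := (PySem.Set.contains_iff vis v).1 hvis
      have hEv : ∀ q ∈ pvE workflows v, q ∈ out := by
        rcases hinv v hvmem with h | h
        · exact h
        · exact absurd h (hPre v hvN)
      have hres : visitB (revMap workflows) (fuel+1) v (vis, out) = (vis, out) := by
        rw [visitB, if_pos hvis]
      rw [hres]
      exact ⟨(pv_update_eq_self _ _ hEv).symm, fun x hx => hx, fun n hn => Or.inr hn⟩
    · have hvmem : v ∉ vis := fun h => hvis ((PySem.Set.contains_iff vis v).2 h)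
      have hres : visitB (revMap workflows) (fuel+1) v (vis, out)
          = (pvDirect workflows v).foldl (fun st p => visitB (revMap workflows) fuel p.1 st)
              (PySem.Set.add vis v, PySem.Set.update out (pvDirect workflows v)) := by
        rw [visitB, if_neg hvis, pv_revMap_getD]
      have hvadd : PySem.Set.add vis v = vis ++ [v] := pv_add_of_not_mem vis hvmem
      have hcard1 : ((node :: pvKeys workflows).toFinset \ (PySem.Set.add vis v).toFinset).card < fuel := by
        have hstrict : ((node :: pvKeys workflows).toFinset \ (PySem.Set.add vis v).toFinset)
            ⊂ ((node :: pvKeys workflows).toFinset \ vis.toFinset) := by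
          constructor
          · apply Finset.sdiff_subset_sdiff (Finset.Subset.refl _)
            intro x hx
            rw [List.mem_toFinset] at hx ⊢
            rw [hvadd]
            exact List.mem_append_left _ hx
          · intro hcontra
            have hvin : v ∈ (node :: pvKeys workflows).toFinset \ vis.toFinset :=
              Finset.mem_sdiff.2 ⟨List.mem_toFinset.2 (pv_mem_node_keys workflows node hvN),
                fun h => hvmem (List.mem_toFinset.1 h)⟩
            have h2 := hcontra hvin
            simp only [Finset.mem_sdiff, List.mem_toFinset] at h2
            exact h2.2 (by rw [hvadd]; exact List.mem_append_right _ List.mem_cons_self)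
        have := Finset.card_lt_card hstrict
        omega
      have hfold := pv_B_fold workflows node fuel (ih) v hvN vis out hinv
        (pvDirect workflows v) (fun p hp => List.mem_map.2 ⟨p, hp, rfl⟩)
        (PySem.Set.add vis v) (PySem.Set.update out (pvDirect workflows v))
        (fun x hx => by rw [hvadd]; exact List.mem_append_left _ hx)
        hcard1
        (fun q hq => pv_mem_update_left _ _ hq)
        (by
          intro n hn
          rw [hvadd, List.mem_append] at hn
          rcases hn with hn | hn
          · rcases hinv n hn with h | h
            · exact Or.inl (fun q hq => pv_mem_update_left _ _ (h q hq))
            · exact Or.inr (Or.inl hn)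
          · exact Or.inr (Or.inr (List.mem_singleton.1 hn)))
      rw [hres]
      obtain ⟨g1, g2, g3, g4⟩ := hfold
      have hout : (List.foldl (fun st p => visitB (revMap workflows) fuel p.1 st)
          (PySem.Set.add vis v, PySem.Set.update out (pvDirect workflows v)) (pvDirect workflows v)).2
          = PySem.Set.update out (pvE workflows v) := by
        rw [g1, ← pv_update_append, ← pv_E_unfold workflows node hPre hvN]
      refine ⟨hout, ?_, ?_⟩
      · intro x hx
        exact g2 x (by rw [hvadd]; exact List.mem_append_left _ hx)
      · intro n hn
        rcases g4 n hn with h | h | rfl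
        · exact Or.inl h
        · exact Or.inr h
        · refine Or.inl ?_
          intro q hq
          rw [hout]
          exact pv_mem_update_right _ _ hq

theorem pv_B_final (workflows : List (String × List String)) (node : String)
    (hPre : Pre_find_predecessors workflows node) :
    find_predecessors_alt workflows node = PySem.Set.ofList (pvE workflows node) := by
  rw [find_predecessors_alt]
  have hcard : ((node :: pvKeys workflows).toFinset \ (PySem.Set.empty : PySem.Set String).toFinset).card
      < workflows.length + 2 := by
    have h1 := List.toFinset_card_le (node :: pvKeys workflows)
    have h2 := pv_keys_len workflows
    have h3 := Finset.card_le_card (Finset.sdiff_subset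
      (s := (node :: pvKeys workflows).toFinset) (t := (PySem.Set.empty : PySem.Set String).toFinset))
    simp only [List.length_cons] at h1
    omega
  have h := (pv_B_main workflows node hPre (workflows.length + 2) node PySem.Set.empty PySem.Set.empty
    List.mem_cons_self hcard (by intro n hn; cases hn)).1
  rw [h, PySem.Set.ofList_eq_foldl]
  rfl

-- ===== VERDICT (by name: the statement is the Claim_ definition above) =====
theorem find_predecessors_spec : Claim_equal_find_predecessors := by
  intro workflows node _ hPre
  show find_predecessors workflows node = find_predecessors_alt workflows node
  rw [pv_A_final workflows node hPre, pv_B_final workflows node hPre]
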